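-- pv_equiv track=rewrite | github.com/Din974/My_projects | 99problem/yin_yang/solution.py | remove_nested_quotes
-- ===== SOURCE A (Python) =====
-- def remove_nested_quotes(s: str) -> str:
--     result = ""
--     stack = []
--
--     for char in s:
--         if char in {'"', "'"}:
--             if stack and stack[-1] == char:
--                 stack.pop()
--             else:
--                 stack.append(char)
--                 result += char
--         elif not stack:
--             result += char
--
--     return result
-- ===== SOURCE B (Python) =====
-- def remove_nested_quotes(s: str) -> str:
--     # Recursive-descent on the quote nesting structure instead of a fold with an
--     # explicit stack: `consume` skips a quoted region (emitting any quote chars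
--     # that open nested regions), returning the index just after the closing quote.
--     out = []
--
--     def consume(i: int, q: str) -> int:
--         while i < len(s):
--             c = s[i]
--             i += 1
--             if c == q:
--                 return i
--             if c == '"' or c == "'":
--                 out.append(c)
--                 i = consume(i, c)
--         return i
--
--     i = 0
--     while i < len(s):
--         c = s[i]
--         i += 1
--         if c == '"' or c == "'":
--             out.append(c)
--             i = consume(i, c)
--         else:
--             out.append(c)
--     return "".join(out)
-- ===== Notes on version B (the rewrite author's own statement) =====
-- stated objective: alternative
-- what changed: Replaces A's single-pass fold with an explicit quote stack by a recursive-descent parser over the nesting structure: a recursive consume routine skips each quoted region (emitting nested opening quotes) and returns the index after its closing quote, so no stack is ever materialised.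
import Mathlib
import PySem

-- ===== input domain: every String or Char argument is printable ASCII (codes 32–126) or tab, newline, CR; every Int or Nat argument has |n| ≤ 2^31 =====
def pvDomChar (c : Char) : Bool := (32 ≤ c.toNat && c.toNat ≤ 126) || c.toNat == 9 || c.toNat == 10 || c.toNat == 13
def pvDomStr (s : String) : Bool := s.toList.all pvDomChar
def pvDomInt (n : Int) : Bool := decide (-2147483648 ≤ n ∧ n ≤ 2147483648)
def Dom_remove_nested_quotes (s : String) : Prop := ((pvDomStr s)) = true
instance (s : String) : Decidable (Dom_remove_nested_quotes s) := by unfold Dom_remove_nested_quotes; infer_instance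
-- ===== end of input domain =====

-- B is a recursive-descent parser over the quote nesting structure instead of A's
-- stack-driven fold; objective: alternative decomposition, same cost.

-- ===== PORT A =====
-- A's loop body: state = (result, stack); the stack is kept top-first.
def stepA (st : List Char × List Char) (c : Char) : List Char × List Char :=
  if c = '"' ∨ c = '\'' then
    match st.2 with
    | t :: rest => if t = c then (st.1, rest) else (st.1 ++ [c], c :: t :: rest)
    | [] => (st.1 ++ [c], [c])
  else if st.2 = [] then (st.1 ++ [c], st.2) else st

def remove_nested_quotes (s : String) : String :=
  String.mk (s.toList.foldl stepA ([], [])).1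

-- ===== PORT B =====
-- B's `consume(i, q)`: skip a region opened by quote q, returning the characters
-- it emits (nested opening quotes) and the remaining input after the closing q.
-- Python iterates by index; here the remaining input is a list and the fuel
-- argument (initially the whole length) only makes the recursion structural.
def consumeB : Nat → List Char → Char → List Char × List Char
  | 0, l, _ => ([], l)
  | _ + 1, [], _ => ([], [])
  | f + 1, c :: tl, q =>
    if c = q then ([], tl)
    else if c = '"' ∨ c = '\'' then
      let p := consumeB f tl c
      let p2 := consumeB f p.2 q
      (c :: (p.1 ++ p2.1), p2.2)
    else consumeB f tl q

-- B's top-level loop: copy chars; on a quote, emit it and hand over to consumeB.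
def topB : Nat → List Char → List Char
  | 0, _ => []
  | _ + 1, [] => []
  | f + 1, c :: tl =>
    if c = '"' ∨ c = '\'' then
      let p := consumeB f tl c
      c :: (p.1 ++ topB f p.2)
    else c :: topB f tl

def remove_nested_quotes_alt (s : String) : String :=
  String.mk (topB s.toList.length s.toList)

-- ===== PRECONDITION & SPEC =====
def Spec_remove_nested_quotes (s : String) (out : String) : Prop := out = remove_nested_quotes_alt s
instance (s : String) (out : String) : Decidable (Spec_remove_nested_quotes s out) := by unfold Spec_remove_nested_quotes; infer_instance

-- ===== CLAIM (what is proved, stated in full; the proofs are below) =====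
def Claim_equal_remove_nested_quotes : Prop := ∀ (s : String), Dom_remove_nested_quotes s → Spec_remove_nested_quotes s (remove_nested_quotes s)

-- ===== LEMMAS AND PROOFS =====

theorem consumeB_len (f : Nat) : ∀ (l : List Char) (q : Char),
    (consumeB f l q).2.length ≤ l.length := by
  induction f with
  | zero => intro l q; simp [consumeB]
  | succ f ih =>
    intro l q
    cases l with
    | nil => simp [consumeB]
    | cons c tl =>
      simp only [consumeB]
      split
      · simp
      · split
        · have h1 := ih tl c
          have h2 := ih (consumeB f tl c).2 q
          simp only [List.length_cons]
          omega
        · have := ih tl q; simpa using Nat.le_succ_of_le this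

-- inside a quoted region: A's fold with stack q :: rest computes the same result
-- as consuming the region then folding the remainder with stack rest.
theorem inside_agree (f : Nat) : ∀ (l : List Char) (q : Char) (rest res : List Char),
    q = '"' ∨ q = '\'' → l.length ≤ f →
    (l.foldl stepA (res, q :: rest)).1
      = (((consumeB f l q).2).foldl stepA (res ++ (consumeB f l q).1, rest)).1 := by
  induction f with
  | zero =>
    intro l q rest res _ hl
    have : l = [] := List.eq_nil_of_length_eq_zero (Nat.le_zero.mp hl)
    subst this; simp [consumeB]
  | succ f ih =>
    intro l q rest res hqq hl
    cases l with
    | nil => simp [consumeB]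
    | cons c tl =>
      simp only [List.length_cons, Nat.succ_le_succ_iff] at hl
      by_cases hcq : c = q
      · subst hcq
        simp [consumeB, stepA, hqq]
      · by_cases hq : c = '"' ∨ c = '\''
        · have hpush : stepA (res, q :: rest) c = (res ++ [c], c :: q :: rest) := by
            simp [stepA, hq, Ne.symm hcq]
          simp only [List.foldl_cons, hpush, consumeB, if_neg hcq, if_pos hq]
          rw [ih tl c (q :: rest) (res ++ [c]) hq hl,
              ih (consumeB f tl c).2 q rest _ hqq (Nat.le_trans (consumeB_len f tl c) hl)]
          simp
        · have hskip : stepA (res, q :: rest) c = (res, q :: rest) := by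
            simp [stepA, hq]
          simp only [List.foldl_cons, hskip, consumeB, if_neg hcq, if_neg hq]
          exact ih tl q rest res hqq hl

theorem top_agree (f : Nat) : ∀ (l res : List Char), l.length ≤ f →
    (l.foldl stepA (res, [])).1 = res ++ topB f l := by
  induction f with
  | zero =>
    intro l res hl
    have : l = [] := List.eq_nil_of_length_eq_zero (Nat.le_zero.mp hl)
    subst this; simp [topB]
  | succ f ih =>
    intro l res hl
    cases l with
    | nil => simp [topB]
    | cons c tl =>
      simp only [List.length_cons, Nat.succ_le_succ_iff] at hl
      by_cases hq : c = '"' ∨ c = '\''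
      · have hpush : stepA (res, []) c = (res ++ [c], [c]) := by
          simp [stepA, hq]
        simp only [List.foldl_cons, hpush, topB, if_pos hq]
        rw [inside_agree f tl c [] (res ++ [c]) hq hl,
            ih (consumeB f tl c).2 _ (Nat.le_trans (consumeB_len f tl c) hl)]
        simp
      · have hcopy : stepA (res, []) c = (res ++ [c], []) := by
          simp [stepA, hq]
        simp only [List.foldl_cons, hcopy, topB, if_neg hq]
        rw [ih tl _ hl]
        simp

-- ===== VERDICT (by name: the statement is the Claim_ definition above) =====
theorem remove_nested_quotes_spec : Claim_equal_remove_nested_quotes := by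
  intro s _
  unfold Spec_remove_nested_quotes remove_nested_quotes remove_nested_quotes_alt
  rw [top_agree s.toList.length s.toList [] (Nat.le_refl _)]
  rfl
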